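-- pv_equiv track=rewrite | github.com/ArthurFranckPat/supply-chain-board | apps/planning-engine/production_planning/feasibility/analyse_rupture.py | _build_article_paths
-- ===== SOURCE A (Python) =====
-- def _build_article_paths(paths: list[list[str]]) -> dict[str, list[str]]:
--     """Map chaque article impacte vers son chemin le plus court."""
--     article_paths: dict[str, list[str]] = {}
--     for path in paths:
--         for i in range(1, len(path)):
--             article = path[i]
--             sub_path = path[: i + 1]
--             if article not in article_paths or len(sub_path) < len(article_paths[article]):
--                 article_paths[article] = sub_path
--     return article_paths
-- ===== SOURCE B (Python) =====
-- def _build_article_paths(paths: list[list[str]]) -> dict[str, list[str]]: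
--     """Map chaque article impacte vers son chemin le plus court.
--
--     Different decomposition: flatten every (article, prefix) candidate, group the
--     candidates per article in first-occurrence order, then take the first
--     shortest prefix of each group with min(key=len).
--     """
--     candidates = [(path[i], path[: i + 1]) for path in paths for i in range(1, len(path))]
--     groups: dict[str, list[list[str]]] = {}
--     for article, sub_path in candidates:
--         groups.setdefault(article, []).append(sub_path)
--     return {article: min(subs, key=len) for article, subs in groups.items()}
-- ===== Notes on version B (the rewrite author's own statement) =====
-- stated objective: alternative
-- what changed: Instead of A's single pass that compares and overwrites a running best-prefix per article, B flattens all (article, prefix) candidates, groups them per article into a dict of lists in first-occurrence order, and then takes min(key=len) of each group.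
import Mathlib
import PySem

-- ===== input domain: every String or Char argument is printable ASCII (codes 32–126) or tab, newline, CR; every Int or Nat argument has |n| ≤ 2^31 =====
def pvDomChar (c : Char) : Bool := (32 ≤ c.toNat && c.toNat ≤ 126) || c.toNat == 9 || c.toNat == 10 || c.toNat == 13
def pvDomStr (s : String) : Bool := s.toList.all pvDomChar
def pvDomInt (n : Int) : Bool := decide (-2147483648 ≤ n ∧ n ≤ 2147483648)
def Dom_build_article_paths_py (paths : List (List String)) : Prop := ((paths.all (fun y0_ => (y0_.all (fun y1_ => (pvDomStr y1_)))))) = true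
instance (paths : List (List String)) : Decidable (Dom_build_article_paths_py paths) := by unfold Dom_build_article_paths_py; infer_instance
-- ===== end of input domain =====

-- B replaces A's running compare-and-overwrite pass by flatten-candidates / group per article / min(key=len) per group (alternative decomposition, same cost).

-- ===== PORT A =====
def build_article_paths_py (paths : List (List String)) : List (String × List String) :=
  (paths.foldl
    (fun article_paths path =>
      (PySem.List.pyRange 1 (PySem.List.len path)).foldl
        (fun article_paths i =>
          -- path[i]: i ∈ range(1, len(path)) is always in range, so pyGetD is exact here
          let article := PySem.List.pyGetD path i ""
          let sub_path := PySem.List.slice path none (some (i + 1))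
          -- `article not in article_paths or len(sub_path) < len(article_paths[article])`:
          -- the lookup is guarded by the short-circuit `or`, so getD with [] is exact
          if article_paths.contains article = false ∨ sub_path.length < (article_paths.getD article []).length
          then article_paths.insert article sub_path
          else article_paths)
        article_paths)
    PySem.Dict.empty).items

-- ===== PORT B =====
def build_article_paths_py_alt (paths : List (List String)) : List (String × List String) :=
  let candidates := paths.flatMap (fun path =>
    (PySem.List.pyRange 1 (PySem.List.len path)).map (fun i =>
      (PySem.List.pyGetD path i "", PySem.List.slice path none (some (i + 1)))))
  let groups := candidates.foldl (fun g c => g.modify c.1 [] (· ++ [c.2])) PySem.Dict.empty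
  -- min(subs, key=len): every group is nonempty, so minD with default [] is exact
  groups.items.map (fun g => (g.1, PySem.List.minD g.2 List.length []))

-- ===== PRECONDITION & SPEC =====
def Spec_build_article_paths_py (paths : List (List String)) (out : List (String × List String)) : Prop := out = build_article_paths_py_alt paths
instance (paths : List (List String)) (out : List (String × List String)) : Decidable (Spec_build_article_paths_py paths out) := by unfold Spec_build_article_paths_py; infer_instance

-- ===== CLAIM (what is proved, stated in full; the proofs are below) =====
def Claim_equal_build_article_paths_py : Prop := ∀ (paths : List (List String)), Dom_build_article_paths_py paths → Spec_build_article_paths_py paths (build_article_paths_py paths)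

-- ===== LEMMAS AND PROOFS =====

-- A's per-candidate step
def pvStepA (d : PySem.Dict String (List String)) (c : String × List String) : PySem.Dict String (List String) :=
  if d.contains c.1 = false ∨ c.2.length < (d.getD c.1 []).length then d.insert c.1 c.2 else d

-- the flattened candidate list both programs traverse
def pvCands (paths : List (List String)) : List (String × List String) :=
  paths.flatMap (fun path =>
    (PySem.List.pyRange 1 (PySem.List.len path)).map (fun i =>
      (PySem.List.pyGetD path i "", PySem.List.slice path none (some (i + 1)))))

-- first minimal-length prefix among a key's candidates
def pvBest (cs : List (String × List String)) (k : String) : List String :=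
  PySem.List.minD ((cs.filter (fun c => c.1 == k)).map (·.2)) List.length []

def pvKeys (cs : List (String × List String)) : List String :=
  PySem.Set.ofList (cs.map Prod.fst)

lemma pvA_eq_foldl_cands (paths : List (List String)) :
    build_article_paths_py paths = ((pvCands paths).foldl pvStepA PySem.Dict.empty).items := by
  unfold build_article_paths_py pvCands pvStepA
  rw [List.foldl_flatMap]
  simp [List.foldl_map]

lemma pvMin?_append (g : List (List String)) (s : List String) :
    PySem.List.min? (g ++ [s]) List.length =
      some (match PySem.List.min? g List.length with
            | none => s
            | some m => if s.length < m.length then s else m) := by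
  rcases h : PySem.List.min? g List.length with _ | m
  · rw [(PySem.List.min?_eq_none_iff _ _).mp h]
    simp [PySem.List.min?]
  · unfold PySem.List.min? at h ⊢
    rw [List.foldl_append, h]
    simp only [List.foldl_cons, List.foldl_nil]
    split <;> rfl

lemma pvFilter_nil_of_not_mem (cs : List (String × List String)) (a : String)
    (h : a ∉ cs.map Prod.fst) : cs.filter (fun c => c.1 == a) = [] := by
  rw [List.filter_eq_nil_iff]
  intro c hc heq
  exact h (List.mem_map.mpr ⟨c, hc, by simpa using heq⟩)

lemma pvGroup_ne_nil_of_mem (cs : List (String × List String)) (a : String)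
    (h : a ∈ cs.map Prod.fst) : (cs.filter (fun c => c.1 == a)).map (·.2) ≠ [] := by
  obtain ⟨c, hc, hfst⟩ := List.mem_map.mp h
  have : c ∈ cs.filter (fun c => c.1 == a) := by
    rw [List.mem_filter]; exact ⟨hc, by simp [hfst]⟩
  simp only [ne_eq, List.map_eq_nil_iff]
  intro hnil
  rw [hnil] at this
  exact absurd this (List.not_mem_nil)

lemma pvKeys_append (cs : List (String × List String)) (c : String × List String) :
    pvKeys (cs ++ [c]) =
      if c.1 ∈ pvKeys cs then pvKeys cs else pvKeys cs ++ [c.1] := by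
  unfold pvKeys PySem.Set.ofList
  rw [List.map_append, List.foldl_append]
  simp [PySem.Set.add]

lemma pvBest_append_ne (cs : List (String × List String)) (c : String × List String)
    (k : String) (h : c.1 ≠ k) : pvBest (cs ++ [c]) k = pvBest cs k := by
  unfold pvBest
  rw [List.filter_append]
  simp [h]

lemma pvBest_append_self (cs : List (String × List String)) (c : String × List String) :
    pvBest (cs ++ [c]) c.1 =
      match PySem.List.min? ((cs.filter (fun x => x.1 == c.1)).map (·.2)) List.length with
      | none => c.2
      | some m => if c.2.length < m.length then c.2 else m := by
  unfold pvBest PySem.List.minD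
  rw [List.filter_append]
  simp only [List.filter_cons, beq_self_eq_true, if_pos, List.filter_nil, List.map_append,
    List.map_cons, List.map_nil]
  rw [pvMin?_append]
  cases PySem.List.min? ((cs.filter (fun x => x.1 == c.1)).map (·.2)) List.length <;> simp

lemma pvMinD_eq_of_min?_some (g : List (List String)) (m : List String)
    (h : PySem.List.min? g List.length = some m) : PySem.List.minD g List.length [] = m := by
  unfold PySem.List.minD
  rw [h]; rfl

-- the core invariant: A's dict after any candidate list is keys-in-first-occurrence order, each with its first shortest prefix
lemma pvA_items (cs : List (String × List String)) :
    (cs.foldl pvStepA PySem.Dict.empty).items = (pvKeys cs).map (fun k => (k, pvBest cs k)) := by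
  induction cs using List.reverseRecOn with
  | nil => simp [pvKeys, PySem.Set.ofList]; rfl
  | append_singleton cs c ih =>
    rw [List.foldl_append, List.foldl_cons, List.foldl_nil]
    set d := cs.foldl pvStepA PySem.Dict.empty with hd
    have hkeys : d.keys = pvKeys cs := by
      show d.items.map Prod.fst = pvKeys cs
      rw [ih, List.map_map]
      exact List.map_id _
    have hnodup : d.keys.Nodup := by
      rw [hkeys]; exact PySem.Set.nodup_ofList _
    have hcont : d.contains c.1 = decide (c.1 ∈ pvKeys cs) := by
      rw [PySem.Dict.contains_eq_decide_mem_keys, hkeys]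
    by_cases hmem : c.1 ∈ pvKeys cs
    · -- key already present
      have hmemf : c.1 ∈ cs.map Prod.fst := (PySem.Set.mem_ofList _ _).mp hmem
      have hg := pvGroup_ne_nil_of_mem cs c.1 hmemf
      obtain ⟨m, hm⟩ : ∃ m, PySem.List.min? ((cs.filter (fun x => x.1 == c.1)).map (·.2)) List.length = some m := by
        cases h : PySem.List.min? ((cs.filter (fun x => x.1 == c.1)).map (·.2)) List.length with
        | none => exact absurd ((PySem.List.min?_eq_none_iff _ _).mp h) hg
        | some m => exact ⟨m, rfl⟩
      have hbest : pvBest cs c.1 = m := pvMinD_eq_of_min?_some _ _ hm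
      have hgetD : d.getD c.1 [] = m := by
        have : (c.1, pvBest cs c.1) ∈ d.items := by
          rw [ih]; exact List.mem_map.mpr ⟨c.1, hmem, rfl⟩
        rw [hbest] at this
        exact PySem.Dict.getD_of_mem_items d this hnodup []
      have hK : pvKeys (cs ++ [c]) = pvKeys cs := by rw [pvKeys_append, if_pos hmem]
      have hBa : pvBest (cs ++ [c]) c.1 = if c.2.length < m.length then c.2 else m := by
        rw [pvBest_append_self, hm]
      unfold pvStepA
      rw [hcont, hgetD, decide_eq_true hmem]
      simp only [Bool.true_eq_false, false_or]
      by_cases hlt : c.2.length < m.length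
      · rw [if_pos hlt]
        rw [PySem.Dict.items_insert_of_contains d c.2 (by rw [hcont]; exact decide_eq_true hmem)]
        rw [ih, hK, List.map_map]
        apply List.map_congr_left
        intro k hk
        by_cases hka : k = c.1
        · subst hka
          simp [hBa, hlt]
        · have : (k == c.1) = false := beq_eq_false_iff_ne.mpr hka
          simp [Function.comp, this, pvBest_append_ne cs c k (fun h => hka h.symm)]
      · rw [if_neg hlt, ih, hK]
        apply List.map_congr_left
        intro k hk
        by_cases hka : k = c.1
        · subst hka
          rw [hBa, if_neg hlt, hbest]
        · rw [pvBest_append_ne cs c k (fun h => hka h.symm)]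
    · -- new key: appended at the end
      have hmemf : c.1 ∉ cs.map Prod.fst := fun h => hmem ((PySem.Set.mem_ofList _ _).mpr h)
      unfold pvStepA
      rw [hcont, decide_eq_false hmem]
      simp only [true_or, if_pos]
      rw [PySem.Dict.items_insert_of_not_contains d c.2 (by rw [hcont]; exact decide_eq_false hmem)]
      rw [ih, pvKeys_append, if_neg hmem, List.map_append]
      congr 1
      · apply List.map_congr_left
        intro k hk
        have hka : c.1 ≠ k := by
          intro h; exact hmem (h ▸ hk)
        rw [pvBest_append_ne cs c k hka]
      · simp only [List.map_cons, List.map_nil]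
        rw [pvBest_append_self, pvFilter_nil_of_not_mem cs c.1 hmemf]
        simp [PySem.List.min?]

-- B's groups dict: same keys, values are the full candidate groups
lemma pvB_eq (paths : List (List String)) :
    build_article_paths_py_alt paths = (pvKeys (pvCands paths)).map (fun k => (k, pvBest (pvCands paths) k)) := by
  unfold build_article_paths_py_alt
  simp only []
  set cs := pvCands paths with hcs
  have harg : (paths.flatMap (fun path =>
      (PySem.List.pyRange 1 (PySem.List.len path)).map (fun i =>
        (PySem.List.pyGetD path i "", PySem.List.slice path none (some (i + 1)))))) = cs := rfl
  rw [harg]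
  set g := cs.foldl (fun g c => g.modify c.1 [] (· ++ [c.2])) PySem.Dict.empty with hg
  have hkeys : g.keys = pvKeys cs := by
    have := PySem.Dict.keys_foldl_modify_key cs Prod.fst [] (fun d x v => v ++ [x.2]) PySem.Dict.empty
    simpa [pvKeys, PySem.Set.update, PySem.Set.ofList, PySem.Dict.keys] using this
  have hnodup : g.keys.Nodup := by rw [hkeys]; exact PySem.Set.nodup_ofList _
  have hitems : g.items = g.keys.map (fun k => (k, g.getD k [])) :=
    PySem.Dict.items_eq_map_keys g hnodup []
  rw [hitems, hkeys, List.map_map]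
  apply List.map_congr_left
  intro k hk
  have hgetD : g.getD k [] = (cs.filter (fun c => c.1 == k)).map (·.2) := by
    have := PySem.Dict.getD_foldl_modify_append cs PySem.Dict.empty k
    simpa using this
  simp [Function.comp, hgetD, pvBest]

-- ===== VERDICT (by name: the statement is the Claim_ definition above) =====
theorem build_article_paths_py_spec : Claim_equal_build_article_paths_py := by
  intro paths _
  unfold Spec_build_article_paths_py
  rw [pvA_eq_foldl_cands, pvA_items, pvB_eq]
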